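-- pv_equiv track=rewrite | github.com/AmalkrishnaAS/DSA_problems | Ishaan Loves Chocolates - GFG/ishaan-loves-chocolates.py | chocolates
-- ===== SOURCE A (Python) =====
-- def chocolates (arr, n) :
--     #Complete the function
--     l,r=0,n-1
--
--     while l<r:
--         if  arr[l]>arr[r]:
--             l+=1
--         else:
--             r-=1
--
--
--     return arr[l]
-- ===== SOURCE B (Python) =====
-- def chocolates(arr, n):
--     # single forward scan with a running minimum over arr[0:n]
--     m = arr[0]
--     for i in range(1, n):
--         v = arr[i]
--         if v < m:
--             m = v
--     return m
-- ===== Notes on version B (the rewrite author's own statement) =====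
-- stated objective: simpler
-- what changed: Replaced the two-pointer converge-from-both-ends selection with a plain single forward scan keeping a running minimum over arr[0:n].
import Mathlib
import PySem

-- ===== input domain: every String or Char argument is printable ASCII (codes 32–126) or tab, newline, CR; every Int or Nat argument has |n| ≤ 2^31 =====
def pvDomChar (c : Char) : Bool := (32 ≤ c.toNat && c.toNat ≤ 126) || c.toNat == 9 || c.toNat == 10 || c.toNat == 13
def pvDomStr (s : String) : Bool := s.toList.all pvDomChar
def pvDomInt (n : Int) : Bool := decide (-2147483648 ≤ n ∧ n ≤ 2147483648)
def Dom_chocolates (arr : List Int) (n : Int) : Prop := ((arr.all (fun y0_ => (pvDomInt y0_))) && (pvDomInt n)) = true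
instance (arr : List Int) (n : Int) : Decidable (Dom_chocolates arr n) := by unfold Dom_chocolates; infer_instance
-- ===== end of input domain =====

-- B replaces A's two-pointer converge-from-both-ends selection by a plain forward scan
-- with a running minimum over arr[0:n]; equivalence of the RETURN value is proved on Pre_.

-- ===== PORT A =====
-- A's while loop: l,r move towards each other; returns arr[l].  Out-of-range index (Python
-- IndexError, excluded by Pre_) yields the default 0 here.
def chocLoop (arr : List Int) (l r : Int) : Int :=
  if _h : l < r then
    match PySem.List.pyGet? arr l, PySem.List.pyGet? arr r with
    | some a, some b => if a > b then chocLoop arr (l + 1) r else chocLoop arr l (r - 1)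
    | _, _ => 0
  else
    (PySem.List.pyGet? arr l).getD 0
termination_by (r - l).toNat
decreasing_by all_goals omega

def chocolates (arr : List Int) (n : Int) : Int :=
  chocLoop arr 0 (n - 1)

-- ===== PORT B =====
-- Source B: m = arr[0]; for i in range(1, n): v = arr[i]; if v < m: m = v; return m.
-- Out-of-range arr[0] (Python IndexError, excluded by Pre_) yields 0; an out-of-range
-- arr[i] inside the loop (also excluded by Pre_) keeps m.
def chocolates_alt (arr : List Int) (n : Int) : Int :=
  match PySem.List.pyGet? arr 0 with
  | none => 0
  | some m0 =>
      (PySem.List.pyRange 1 n 1).foldl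
        (fun m i =>
          let v := (PySem.List.pyGet? arr i).getD m
          if v < m then v else m) m0

-- ===== PRECONDITION & SPEC =====
-- Pre_ excludes exactly the inputs on which the Python A raises IndexError:
-- an empty arr, or n larger than len(arr).
def Pre_chocolates (arr : List Int) (n : Int) : Prop :=
  arr ≠ [] ∧ n ≤ (arr.length : Int)
instance (arr : List Int) (n : Int) : Decidable (Pre_chocolates arr n) := by
  unfold Pre_chocolates; infer_instance

def pvWitness_chocolates : List Int × Int := ([3, 1, 2], 3)

def Spec_chocolates (arr : List Int) (n : Int) (out : Int) : Prop := out = chocolates_alt arr n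
instance (arr : List Int) (n : Int) (out : Int) : Decidable (Spec_chocolates arr n out) := by
  unfold Spec_chocolates; infer_instance

-- ===== CLAIM (what is proved, stated in full; the proofs are below) =====
def Claim_equal_chocolates : Prop := ∀ (arr : List Int) (n : Int), Dom_chocolates arr n → Pre_chocolates arr n → Spec_chocolates arr n (chocolates arr n)

-- ===== LEMMAS AND PROOFS =====

-- mathematical minimum of arr[l..r] by index recursion
def minIdx (arr : List Int) (l r : Nat) : Int :=
  if _h : l < r then min (arr.getD l 0) (minIdx arr (l + 1) r) else arr.getD l 0
termination_by r - l

lemma minIdx_le_self (arr : List Int) (l r : Nat) : minIdx arr l r ≤ arr.getD l 0 := by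
  rw [minIdx]
  split
  · exact min_le_left _ _
  · exact le_refl _

lemma minIdx_le_last (arr : List Int) (l r : Nat) (h : l ≤ r) :
    minIdx arr l r ≤ arr.getD r 0 := by
  induction hn : r - l generalizing l with
  | zero =>
    have : l = r := by omega
    subst this
    rw [minIdx]; simp
  | succ k ih =>
    rw [minIdx]
    have hlt : l < r := by omega
    simp only [dif_pos hlt]
    exact le_trans (min_le_right _ _) (ih (l + 1) (by omega) (by omega))

lemma minIdx_last_peel (arr : List Int) (l r : Nat) (h : l < r) :
    minIdx arr l r = min (minIdx arr l (r - 1)) (arr.getD r 0) := by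
  induction hn : r - l generalizing l with
  | zero => omega
  | succ k ih =>
    by_cases hle : l + 1 < r
    · rw [minIdx, dif_pos h, ih (l + 1) hle (by omega)]
      rw [show minIdx arr l (r - 1) = min (arr.getD l 0) (minIdx arr (l + 1) (r - 1)) by
        rw [minIdx, dif_pos (by omega)]]
      rw [min_assoc]
    · have hr : r = l + 1 := by omega
      subst hr
      rw [minIdx, dif_pos h]
      simp only [Nat.add_sub_cancel]
      rw [show minIdx arr (l + 1) (l + 1) = arr.getD (l + 1) 0 by rw [minIdx]; simp]
      rw [show minIdx arr l l = arr.getD l 0 by rw [minIdx]; simp]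

lemma pyGet?_nat (arr : List Int) (k : Nat) (hk : k < arr.length) :
    PySem.List.pyGet? arr (k : Int) = some (arr.getD k 0) := by
  rw [PySem.List.pyGet?_natCast]
  rw [List.getD_eq_getElem?_getD]
  simp [List.getElem?_eq_getElem hk]

lemma chocLoop_eq_minIdx (arr : List Int) (l r : Nat) (h : l ≤ r) (hr : r < arr.length) :
    chocLoop arr (l : Int) (r : Int) = minIdx arr l r := by
  induction hn : r - l generalizing l r with
  | zero =>
    have : l = r := by omega
    subst this
    rw [chocLoop, dif_neg (by omega), minIdx, dif_neg (by omega)]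
    rw [pyGet?_nat arr l (by omega)]
    rfl
  | succ k ih =>
    have hlt : l < r := by omega
    rw [chocLoop, dif_pos (by exact_mod_cast hlt)]
    rw [pyGet?_nat arr l (by omega), pyGet?_nat arr r hr]
    by_cases hab : arr.getD l 0 > arr.getD r 0
    · simp only [if_pos hab]
      have cast1 : (l : Int) + 1 = ((l + 1 : Nat) : Int) := by push_cast; ring
      rw [cast1, ih (l + 1) r (by omega) hr (by omega)]
      have hle2 : minIdx arr (l + 1) r ≤ arr.getD l 0 :=
        le_trans (minIdx_le_last arr (l + 1) r (by omega)) (by omega)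
      rw [show minIdx arr l r = min (arr.getD l 0) (minIdx arr (l + 1) r) by
        rw [minIdx, dif_pos hlt]]
      exact (min_eq_right hle2).symm
    · simp only [if_neg hab]
      have cast1 : (r : Int) - 1 = ((r - 1 : Nat) : Int) := by omega
      rw [cast1, ih l (r - 1) (by omega) (by omega) (by omega)]
      rw [minIdx_last_peel arr l r hlt]
      have hle2 : minIdx arr l (r - 1) ≤ arr.getD r 0 :=
        le_trans (minIdx_le_self arr l (r - 1)) (by omega)
      exact (min_eq_left hle2).symm

lemma fold_eq_minIdx (arr : List Int) (N : Nat) (hN : N ≤ arr.length) :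
    ∀ (i : Nat) (acc : Int), 1 ≤ i →
      (PySem.List.pyRange (i : Int) (N : Int) 1).foldl
        (fun m j =>
          let v := (PySem.List.pyGet? arr j).getD m
          if v < m then v else m) acc
      = if i < N then min acc (minIdx arr i (N - 1)) else acc := by
  intro i acc hi
  induction hn : N - i generalizing i acc with
  | zero =>
    rw [PySem.List.pyRange_one_eq_nil (by omega)]
    simp only [List.foldl_nil]
    rw [if_neg (by omega)]
  | succ k ih =>
    have hiN : i < N := by omega
    rw [PySem.List.pyRange_one_cons (by exact_mod_cast hiN)]
    simp only [List.foldl_cons]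
    rw [pyGet?_nat arr i (by omega)]
    have step : (let v := (some (arr.getD i 0)).getD acc;
        if v < acc then v else acc) = min acc (arr.getD i 0) := by
      simp only [Option.getD_some, min_def]
      split_ifs <;> omega
    rw [show ((i : Int) + 1) = ((i + 1 : Nat) : Int) by push_cast; ring]
    rw [ih (i + 1) _ (by omega) (by omega)]
    by_cases h2 : i + 1 < N
    · rw [if_pos h2, if_pos hiN, step]
      rw [show minIdx arr i (N - 1) = min (arr.getD i 0) (minIdx arr (i + 1) (N - 1)) by
        rw [minIdx, dif_pos (by omega)]]
      rw [min_assoc]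
    · have : i = N - 1 := by omega
      rw [if_neg h2, if_pos hiN, step, this]
      rw [show minIdx arr (N - 1) (N - 1) = arr.getD (N - 1) 0 by rw [minIdx]; simp]

-- ===== VERDICT (by name: the statement is the Claim_ definition above) =====
theorem chocolates_spec : Claim_equal_chocolates := by
  intro arr n _hDom hPre
  obtain ⟨hne, hlen⟩ := hPre
  have hlen0 : 0 < arr.length := List.length_pos_iff.mpr hne
  unfold Spec_chocolates chocolates chocolates_alt
  have hget : PySem.List.pyGet? arr 0 = some (arr.getD 0 0) := by
    have h := pyGet?_nat arr 0 hlen0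
    push_cast at h
    exact h
  rw [hget]
  by_cases h1 : n ≤ 1
  · -- loop empty on both sides: both return arr[0]
    rw [PySem.List.pyRange_one_eq_nil (by omega)]
    simp only [List.foldl_nil]
    rw [chocLoop, dif_neg (by omega), hget]
    rfl
  · -- 2 ≤ n: both sides equal minIdx arr 0 (n-1)
    have hN : n.toNat ≤ arr.length := by omega
    have h2 : 2 ≤ n.toNat := by omega
    rw [show n = ((n.toNat : Nat) : Int) by omega]
    have hf := fold_eq_minIdx arr n.toNat hN 1 (arr.getD 0 0) le_rfl
    push_cast at hf
    show chocLoop arr 0 (((n.toNat : Nat) : Int) - 1)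
      = List.foldl
          (fun m j => if (PySem.List.pyGet? arr j).getD m < m then (PySem.List.pyGet? arr j).getD m else m)
          (arr.getD 0 0) (PySem.List.pyRange 1 ((n.toNat : Nat) : Int) 1)
    rw [hf, if_pos (by omega)]
    rw [show ((n.toNat : Nat) : Int) - 1 = ((n.toNat - 1 : Nat) : Int) by omega]
    rw [show (0 : Int) = ((0 : Nat) : Int) by norm_num]
    rw [chocLoop_eq_minIdx arr 0 (n.toNat - 1) (by omega) (by omega)]
    rw [show minIdx arr 0 (n.toNat - 1)
        = min (arr.getD 0 0) (minIdx arr 1 (n.toNat - 1)) by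
      rw [minIdx, dif_pos (by omega)]]
    push_cast
    rfl
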